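-- pv_equiv track=rewrite | github.com/RobErdei/password-cypher | Main/Main.py | SequenceBreak
-- ===== SOURCE A (Python) =====
-- def SequenceBreak(string):  # Breaks up sequence string into key set headers
--     result = []
--     current = ''
--
--     for char in string:
--         if char.isalpha():  # Checks if character is a letter
--             if current:
--                 result.append(current)      # Appends the current string in the queue to the result set as a key set
--                 current = char              # Resets current queue
--             else:
--                 current += char
--         else:
--             current += char
--     if current:
--         result.append(current)
--
--     return result
-- ===== SOURCE B (Python) =====
-- def SequenceBreak(string):  # Two-pointer scan: append slices [i:j) where j is the next letter index (or the end); no char-by-char accumulator.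
--     result = []
--     n = len(string)
--     i = 0
--     while i < n:
--         j = i + 1
--         while j < n and not string[j].isalpha():
--             j += 1
--         result.append(string[i:j])
--         i = j
--     return result
-- ===== Notes on version B (the rewrite author's own statement) =====
-- stated objective: alternative
-- what changed: Replaces A's character-by-character state machine (growing a 'current' accumulator string and flushing it at each letter) with a two-pointer scan that finds the next letter index and appends the slice string[i:j] directly.
import Mathlib
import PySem

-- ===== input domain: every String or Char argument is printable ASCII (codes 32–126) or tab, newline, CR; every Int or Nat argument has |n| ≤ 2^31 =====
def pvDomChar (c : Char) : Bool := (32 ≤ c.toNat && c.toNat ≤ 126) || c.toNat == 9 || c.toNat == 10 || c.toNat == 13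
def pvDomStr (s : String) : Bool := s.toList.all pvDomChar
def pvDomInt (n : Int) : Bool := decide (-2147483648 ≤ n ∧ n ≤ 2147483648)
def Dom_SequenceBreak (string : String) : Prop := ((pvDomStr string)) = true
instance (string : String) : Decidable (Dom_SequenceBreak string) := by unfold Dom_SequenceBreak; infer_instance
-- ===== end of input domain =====

-- B replaces A's char-by-char accumulator state machine with a two-pointer scan appending slices (objective: alternative, same O(n) cost).

-- ===== PORT A =====
-- state = (result, current); 'current += char' is st.2 ++ [c]
def pvStepA (st : List String × List Char) (c : Char) : List String × List Char :=
  if PySem.Chars.isalpha c then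
    if st.2 ≠ [] then (st.1 ++ [String.ofList st.2], [c])
    else (st.1, st.2 ++ [c])
  else (st.1, st.2 ++ [c])

def SequenceBreak (string : String) : List String :=
  let fin := string.toList.foldl pvStepA ([], [])
  if fin.2 ≠ [] then fin.1 ++ [String.ofList fin.2] else fin.1

-- ===== PORT B =====
-- inner 'while j < n and not string[j].isalpha(): j += 1' (string[j] is in range since j < n)
def pvFindEnd (cs : List Char) (j : Nat) : Nat :=
  if j < cs.length ∧ ¬ PySem.Chars.isalpha (cs.getD j ' ') then pvFindEnd cs (j + 1) else j
termination_by cs.length - j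
decreasing_by omega

-- every call of pvFindEnd returns an index ≥ its argument (needed for the outer loop's termination)
theorem le_pvFindEnd (cs : List Char) (j : Nat) : j ≤ pvFindEnd cs j := by
  fun_induction pvFindEnd with
  | case1 j h ih => omega
  | case2 => omega

-- outer 'while i < n: … result.append(string[i:j]); i = j'
def pvOuter (cs : List Char) (i : Nat) : List String :=
  if h : i < cs.length then
    let j := pvFindEnd cs (i + 1)
    String.ofList (PySem.List.slice cs (some (i : Int)) (some (j : Int))) :: pvOuter cs j
  else []
termination_by cs.length - i
decreasing_by have := le_pvFindEnd cs (i + 1); omega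

def SequenceBreak_alt (string : String) : List String := pvOuter string.toList 0

-- ===== PRECONDITION & SPEC =====
def Spec_SequenceBreak (string : String) (out : List String) : Prop := out = SequenceBreak_alt string
instance (string : String) (out : List String) : Decidable (Spec_SequenceBreak string out) := by unfold Spec_SequenceBreak; infer_instance

-- ===== CLAIM (what is proved, stated in full; the proofs are below) =====
def Claim_equal_SequenceBreak : Prop := ∀ (string : String), Dom_SequenceBreak string → Spec_SequenceBreak string (SequenceBreak string)

-- ===== LEMMAS AND PROOFS =====

-- p: "is not a letter"
def pvNotAlpha (c : Char) : Bool := !PySem.Chars.isalpha c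

-- structural recursion both programs compute: chunks = head char + following non-letters
def pvChunks (cs : List Char) : List String :=
  match cs with
  | [] => []
  | c :: rest =>
      String.ofList (c :: rest.takeWhile pvNotAlpha) :: pvChunks (rest.dropWhile pvNotAlpha)
termination_by cs.length
decreasing_by have := List.length_dropWhile_le pvNotAlpha rest; simp; omega

theorem drop_length_takeWhile {α : Type} (p : α → Bool) (l : List α) :
    l.drop (l.takeWhile p).length = l.dropWhile p := by
  induction l with
  | nil => rfl
  | cons a l ih => by_cases h : p a <;> simp [List.takeWhile, List.dropWhile, h, ih]

theorem take_length_takeWhile {α : Type} (p : α → Bool) (l : List α) :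
    l.take (l.takeWhile p).length = l.takeWhile p := by
  induction l with
  | nil => rfl
  | cons a l ih => by_cases h : p a <;> simp [List.takeWhile, h, ih]

-- pvFindEnd lands at j + (number of following non-letters)
theorem pvFindEnd_eq (cs : List Char) (j : Nat) (hj : j ≤ cs.length) :
    pvFindEnd cs j = j + ((cs.drop j).takeWhile pvNotAlpha).length := by
  fun_induction pvFindEnd with
  | case1 j h ih =>
      have hd : cs.drop j = cs.getD j ' ' :: cs.drop (j + 1) := by
        rw [List.getD_eq_getElem _ _ h.1]
        exact (List.drop_eq_getElem_cons h.1)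
      have hp : pvNotAlpha (cs.getD j ' ') = true := by
        simp only [pvNotAlpha, Bool.not_eq_true']
        simpa using h.2
      rw [ih (by omega), hd, List.takeWhile_cons, hp]
      simp
      omega
  | case2 j h =>
      rcases Nat.lt_or_ge j cs.length with hlt | hge
      · have hd : cs.drop j = cs.getD j ' ' :: cs.drop (j + 1) := by
          rw [List.getD_eq_getElem _ _ hlt]
          exact (List.drop_eq_getElem_cons hlt)
        have halpha : PySem.Chars.isalpha (cs.getD j ' ') = true := by
          by_contra hc
          exact h ⟨hlt, by simpa using hc⟩
        have hp : pvNotAlpha (cs.getD j ' ') = false := by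
          rw [pvNotAlpha, halpha]
          rfl
        rw [hd, List.takeWhile_cons, hp]
        simp
      · rw [List.drop_eq_nil_of_le hge]
        simp

-- the outer loop computes pvChunks of the remaining suffix
theorem pvOuter_eq (cs : List Char) (i : Nat) (hi : i ≤ cs.length) :
    pvOuter cs i = pvChunks (cs.drop i) := by
  fun_induction pvOuter with
  | case1 i h j ih =>
      have hd : cs.drop i = cs[i] :: cs.drop (i + 1) := List.drop_eq_getElem_cons h
      have hj : j = (i + 1) + ((cs.drop (i + 1)).takeWhile pvNotAlpha).length :=
        pvFindEnd_eq cs (i + 1) (by omega)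
      have hlen : ((cs.drop (i + 1)).takeWhile pvNotAlpha).length ≤ cs.length - (i + 1) := by
        have := List.IsPrefix.length_le (List.takeWhile_prefix (l := cs.drop (i + 1)) pvNotAlpha)
        simpa using this
      have hslice : PySem.List.slice cs (some (i : Int)) (some (j : Int)) =
          cs[i] :: (cs.drop (i + 1)).takeWhile pvNotAlpha := by
        rw [PySem.List.slice_natCast, hd]
        have hji : j - i = ((cs.drop (i + 1)).takeWhile pvNotAlpha).length + 1 := by omega
        rw [hji, List.take_succ_cons, take_length_takeWhile]
      rw [ih (by omega), hslice, hd]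
      have hdropj : cs.drop j = (cs.drop (i + 1)).dropWhile pvNotAlpha := by
        rw [← drop_length_takeWhile pvNotAlpha (cs.drop (i + 1)), List.drop_drop, hj]
      rw [hdropj]
      rw [pvChunks]
  | case2 i h =>
      rw [List.drop_eq_nil_of_le (by omega), pvChunks]

-- A's fold, characterised: finishing from any state (r, cur)
def pvGoA (cur : List Char) (cs : List Char) : List String :=
  match cs with
  | [] => if cur ≠ [] then [String.ofList cur] else []
  | c :: cs =>
      if PySem.Chars.isalpha c then
        if cur ≠ [] then String.ofList cur :: pvGoA [c] cs else pvGoA (cur ++ [c]) cs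
      else pvGoA (cur ++ [c]) cs

theorem foldA_eq (cs : List Char) (r : List String) (cur : List Char) :
    (let fin := cs.foldl pvStepA (r, cur);
     if fin.2 ≠ [] then fin.1 ++ [String.ofList fin.2] else fin.1) = r ++ pvGoA cur cs := by
  induction cs generalizing r cur with
  | nil => by_cases h : cur = [] <;> simp [pvGoA, h]
  | cons c cs ih =>
      by_cases ha : PySem.Chars.isalpha c <;> by_cases hc : cur = [] <;>
        simp [pvGoA, pvStepA, ha, hc, ih]

-- pvGoA from a nonempty accumulator: the accumulator absorbs the non-letters, then chunks restart
theorem pvGoA_nonempty (cs : List Char) (cur : List Char) (h : cur ≠ []) :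
    pvGoA cur cs =
      String.ofList (cur ++ cs.takeWhile pvNotAlpha) :: pvChunks (cs.dropWhile pvNotAlpha) := by
  induction cs generalizing cur with
  | nil => simp [pvGoA, h, pvChunks]
  | cons c cs ih =>
      by_cases ha : PySem.Chars.isalpha c
      · have h1 : pvNotAlpha c = false := by simp [pvNotAlpha, ha]
        simp only [pvGoA, ha, if_pos h, h1, List.takeWhile_cons, List.dropWhile_cons,
          Bool.false_eq_true, if_false]
        rw [ih [c] (by simp)]
        rw [pvChunks]
        simp
      · have h1 : pvNotAlpha c = true := by simp [pvNotAlpha, ha]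
        simp only [pvGoA, ha, List.takeWhile_cons, List.dropWhile_cons, h1]
        rw [ih (cur ++ [c]) (by simp)]
        simp

theorem pvGoA_nil_eq_chunks (cs : List Char) : pvGoA [] cs = pvChunks cs := by
  cases cs with
  | nil => rw [pvGoA, pvChunks]; simp
  | cons c cs =>
      have : pvGoA [] (c :: cs) = pvGoA [c] cs := by
        by_cases ha : PySem.Chars.isalpha c <;> simp [pvGoA, ha]
      rw [this, pvGoA_nonempty cs [c] (by simp), pvChunks]
      simp

-- ===== VERDICT (by name: the statement is the Claim_ definition above) =====
theorem SequenceBreak_spec : Claim_equal_SequenceBreak := by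
  intro s _
  show SequenceBreak s = SequenceBreak_alt s
  unfold SequenceBreak SequenceBreak_alt
  rw [pvOuter_eq s.toList 0 (by omega)]
  have := foldA_eq s.toList [] []
  simpa [pvGoA_nil_eq_chunks] using this
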